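-- pv_equiv track=rewrite | github.com/quytttb/FomularLatex | asymptotic_advanced/asymptotic_advanced_ABCD.py | generate_wrong_answers_asymptote_3
-- ===== SOURCE A (Python) =====
-- def generate_wrong_answers_asymptote_3(correct_count, valid_m_values, a, b, c, d, constant_term):
--     """Generate 3 wrong answers based on common mistakes in counting asymptotes."""
--     wrong_answers = []
--
--     # Wrong answer 1: Quên điều kiện f(a) ≠ 0 (chỉ tính Δ > 0)
--     count_wrong1 = 0
--     for m in range(-10, 11):
--         delta = (b*m + c)**2 - 4*constant_term
--         if delta > 0:  # Chỉ kiểm tra Δ > 0, bỏ qua f(a) ≠ 0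
--             count_wrong1 += 1
--     wrong_answers.append(str(count_wrong1))
--
--     # Wrong answer 2: Sai điều kiện Δ (dùng Δ ≥ 0 thay vì Δ > 0)
--     count_wrong2 = 0
--     for m in range(-10, 11):
--         f_a = a*a + (b*m + c)*a + constant_term
--         delta = (b*m + c)**2 - 4*constant_term
--         if f_a != 0 and delta >= 0:  # Dùng Δ ≥ 0 thay vì Δ > 0
--             count_wrong2 += 1
--     wrong_answers.append(str(count_wrong2))
--
--     # Wrong answer 3: Nhầm khoảng đếm (dùng [-10, 10) thay vì [-10, 10] hoặc nhầm logic)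
--     # Hoặc tính sai công thức f(a)
--     count_wrong3 = 0
--     for m in range(-10, 10):  # Thiếu m=10
--         f_a = a*a + (b*m + c)*a + constant_term
--         delta = (b*m + c)**2 - 4*constant_term
--         if f_a != 0 and delta > 0:
--             count_wrong3 += 1
--     wrong_answers.append(str(count_wrong3))
--
--     return wrong_answers
-- ===== SOURCE B (Python) =====
-- def generate_wrong_answers_asymptote_3(correct_count, valid_m_values, a, b, c, d, constant_term):
--     """Recursively tally the suffix [m, 10]: each level adds its own m's
--     contribution to the three counts returned for the larger m's."""
--     def suffix_counts(m):
--         if m > 10: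
--             return (0, 0, 0)
--         r1, r2, r3 = suffix_counts(m + 1)
--         s = b * m + c
--         delta = s * s - 4 * constant_term
--         f_a = a * a + s * a + constant_term
--         nz = f_a != 0
--         return ((delta > 0) + r1,
--                 (nz and delta >= 0) + r2,
--                 (m < 10 and nz and delta > 0) + r3)
--     c1, c2, c3 = suffix_counts(-10)
--     return [str(c1), str(c2), str(c3)]
-- ===== Notes on version B (the rewrite author's own statement) =====
-- stated objective: alternative
-- what changed: A's three separate left-to-right accumulator loops over the m-range are replaced by one recursive function that computes the count triple for the suffix [m,10] by recursing on m+1 first and adding m's own contributions on the way out (right-fold built back-to-front), with count 3's shorter range expressed as the m<10 contribution.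
import Mathlib
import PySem

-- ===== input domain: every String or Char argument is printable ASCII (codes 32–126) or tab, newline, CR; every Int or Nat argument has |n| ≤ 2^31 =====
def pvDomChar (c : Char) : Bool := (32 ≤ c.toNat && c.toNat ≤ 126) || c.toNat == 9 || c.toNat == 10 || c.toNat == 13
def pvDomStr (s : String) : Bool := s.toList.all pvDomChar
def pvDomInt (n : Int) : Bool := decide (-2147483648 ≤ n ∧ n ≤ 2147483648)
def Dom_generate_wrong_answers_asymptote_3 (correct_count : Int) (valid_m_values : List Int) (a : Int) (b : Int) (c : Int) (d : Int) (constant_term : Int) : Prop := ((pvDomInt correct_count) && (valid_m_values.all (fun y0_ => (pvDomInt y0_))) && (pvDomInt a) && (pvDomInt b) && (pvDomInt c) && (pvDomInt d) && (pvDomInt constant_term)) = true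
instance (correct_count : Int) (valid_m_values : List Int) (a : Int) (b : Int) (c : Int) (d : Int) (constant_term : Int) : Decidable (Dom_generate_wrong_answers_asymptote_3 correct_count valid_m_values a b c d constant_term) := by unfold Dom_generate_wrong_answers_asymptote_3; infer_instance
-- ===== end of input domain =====

-- B replaces A's three accumulator loops by one recursive function building the count
-- triple for the suffix [m,10] back-to-front (objective: alternative, not faster).

-- ===== PORT A =====
-- Literal port: three independent loops over range(-10,11), range(-10,11), range(-10,10).
def generate_wrong_answers_asymptote_3 (correct_count : Int) (valid_m_values : List Int) (a : Int) (b : Int) (c : Int) (d : Int) (constant_term : Int) : List String :=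
  let count_wrong1 := (PySem.List.pyRange (-10) 11 1).foldl (fun acc m =>
      let delta := (b*m + c)^2 - 4*constant_term
      if delta > 0 then acc + 1 else acc) 0
  let wrong_answers : List String := [PySem.Int.toStr count_wrong1]
  let count_wrong2 := (PySem.List.pyRange (-10) 11 1).foldl (fun acc m =>
      let f_a := a*a + (b*m + c)*a + constant_term
      let delta := (b*m + c)^2 - 4*constant_term
      if f_a ≠ 0 ∧ delta ≥ 0 then acc + 1 else acc) 0
  let wrong_answers := wrong_answers ++ [PySem.Int.toStr count_wrong2]
  let count_wrong3 := (PySem.List.pyRange (-10) 10 1).foldl (fun acc m =>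
      let f_a := a*a + (b*m + c)*a + constant_term
      let delta := (b*m + c)^2 - 4*constant_term
      if f_a ≠ 0 ∧ delta > 0 then acc + 1 else acc) 0
  let wrong_answers := wrong_answers ++ [PySem.Int.toStr count_wrong3]
  wrong_answers

-- ===== PORT B =====
-- Source B's recursive suffix_counts(m): fuel n = number of remaining values, so the call
-- for m carries fuel (11 - m).toNat and the 'm > 10' base case is fuel 0 (exact here
-- since m only ranges over [-10, 11]).
def pvSuffixCounts (a b c k : Int) : Nat → Int × Int × Int
  | 0 => (0, 0, 0)
  | n+1 =>
    let m : Int := 10 - (n : Int)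
    let r := pvSuffixCounts a b c k n
    let s := b*m + c
    let delta := s*s - 4*k
    let f_a := a*a + s*a + k
    ((if delta > 0 then 1 else 0) + r.1,
     (if f_a ≠ 0 ∧ delta ≥ 0 then 1 else 0) + r.2.1,
     (if m < 10 ∧ f_a ≠ 0 ∧ delta > 0 then 1 else 0) + r.2.2)

def generate_wrong_answers_asymptote_3_alt (correct_count : Int) (valid_m_values : List Int) (a : Int) (b : Int) (c : Int) (d : Int) (constant_term : Int) : List String :=
  let r := pvSuffixCounts a b c constant_term 21   -- suffix_counts(-10): fuel (11 - (-10)) = 21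
  [PySem.Int.toStr r.1, PySem.Int.toStr r.2.1, PySem.Int.toStr r.2.2]

-- ===== PRECONDITION & SPEC =====
def Spec_generate_wrong_answers_asymptote_3 (correct_count : Int) (valid_m_values : List Int) (a : Int) (b : Int) (c : Int) (d : Int) (constant_term : Int) (out : List String) : Prop := out = generate_wrong_answers_asymptote_3_alt correct_count valid_m_values a b c d constant_term
instance (correct_count : Int) (valid_m_values : List Int) (a : Int) (b : Int) (c : Int) (d : Int) (constant_term : Int) (out : List String) : Decidable (Spec_generate_wrong_answers_asymptote_3 correct_count valid_m_values a b c d constant_term out) := by unfold Spec_generate_wrong_answers_asymptote_3; infer_instance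

-- ===== CLAIM (what is proved, stated in full; the proofs are below) =====
def Claim_equal_generate_wrong_answers_asymptote_3 : Prop := ∀ (correct_count : Int) (valid_m_values : List Int) (a : Int) (b : Int) (c : Int) (d : Int) (constant_term : Int), Dom_generate_wrong_answers_asymptote_3 correct_count valid_m_values a b c d constant_term → Spec_generate_wrong_answers_asymptote_3 correct_count valid_m_values a b c d constant_term (generate_wrong_answers_asymptote_3 correct_count valid_m_values a b c d constant_term)

-- ===== LEMMAS AND PROOFS =====

-- The recursive suffix tally equals the three membership counts over the suffix range.
theorem pv_suffix_eq_countP (a b c k : Int) (n : Nat) :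
    pvSuffixCounts a b c k n =
      ((((PySem.List.pyRange (11 - (n:Int)) 11 1).countP
          (fun m => decide ((b*m + c)*(b*m + c) - 4*k > 0)) : Nat) : Int),
       (((PySem.List.pyRange (11 - (n:Int)) 11 1).countP
          (fun m => decide (a*a + (b*m + c)*a + k ≠ 0 ∧ (b*m + c)*(b*m + c) - 4*k ≥ 0)) : Nat) : Int),
       (((PySem.List.pyRange (11 - (n:Int)) 11 1).countP
          (fun m => decide (m < 10 ∧ a*a + (b*m + c)*a + k ≠ 0 ∧ (b*m + c)*(b*m + c) - 4*k > 0)) : Nat) : Int)) := by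
  induction n with
  | zero =>
    simp [pvSuffixCounts, PySem.List.pyRange_one_eq_nil (by norm_num : (11:Int) ≤ 11)]
  | succ n ih =>
    have hm : (11 : Int) - ((n:Nat)+1 : Nat) = 10 - (n:Int) := by push_cast; ring
    have hcons : PySem.List.pyRange (11 - ((n:Nat)+1 : Nat) : Int) 11 1
        = (10 - (n:Int)) :: PySem.List.pyRange (11 - (n:Int)) 11 1 := by
      have harg : (10 : Int) - (n:Int) + 1 = 11 - (n:Int) := by ring
      rw [hm, PySem.List.pyRange_one_cons (by omega : (10:Int) - (n:Int) < 11), harg]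
    simp only [pvSuffixCounts, ih, hcons, List.countP_cons]
    refine Prod.ext ?_ (Prod.ext ?_ ?_) <;>
      · simp only []
        split_ifs <;> simp only [decide_eq_true_eq, not_lt] at * <;> push_cast <;> omega

theorem generate_wrong_answers_asymptote_3_spec' (correct_count : Int) (valid_m_values : List Int) (a b c d k : Int) :
    generate_wrong_answers_asymptote_3 correct_count valid_m_values a b c d k
      = generate_wrong_answers_asymptote_3_alt correct_count valid_m_values a b c d k := by
  unfold generate_wrong_answers_asymptote_3 generate_wrong_answers_asymptote_3_alt
  rw [pv_suffix_eq_countP]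
  have h21 : (11 : Int) - ((21:Nat) : Int) = -10 := by norm_num
  rw [h21]
  simp only [PySem.List.foldl_ite_add_one, zero_add, List.cons_append, List.nil_append,
    List.cons.injEq, and_true]
  refine ⟨?_, ?_, ?_⟩
  · congr 1
    congr 1
    apply List.countP_congr
    intro m _
    simp [pow_two]
  · congr 1
    congr 1
    apply List.countP_congr
    intro m _
    simp [pow_two]
  · -- third count: peel m = 10 off B's full range; its guard m < 10 is false there
    have hsplit : PySem.List.pyRange (-10 : Int) 11 1
        = PySem.List.pyRange (-10 : Int) 10 1 ++ [(10 : Int)] := by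
      simpa using PySem.List.pyRange_one_succ_right (a := (-10:Int)) (b := 10) (by norm_num)
    rw [hsplit, List.countP_append]
    simp only [List.countP_cons, List.countP_nil, lt_self_iff_false, false_and,
      decide_false, Bool.false_eq_true, if_false, add_zero]
    congr 1
    congr 1
    apply List.countP_congr
    intro m hm
    have : m < 10 := (PySem.List.mem_pyRange_one.mp hm).2
    simp [pow_two, this]

-- ===== VERDICT (by name: the statement is the Claim_ definition above) =====
theorem generate_wrong_answers_asymptote_3_spec : Claim_equal_generate_wrong_answers_asymptote_3 := by
  intro correct_count valid_m_values a b c d k _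
  exact generate_wrong_answers_asymptote_3_spec' correct_count valid_m_values a b c d k
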